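-- pv_equiv track=rewrite | github.com/pypi-data/pypi-mirror-342 | packages/heliodash/heliodash-0.0.15-py3-none-any.whl/heliodash/sun/soho/soho_video.py | soho_video
-- ===== SOURCE A (Python) =====
-- def soho_video(
--     products=[],
-- ):
--     product_information = {
--         "171": r"EIT 171 Å",
--         "195": r"EIT 195 Å",
--         "284": r"EIT 284 Å",
--         "304": r"EIT 304 Å",
--         "c2": r"LASCO C2",
--         "c3": r"LASCO C3",
--         "c2_combo": r"LASCO C2 Combo",
--         "c3_combo": r"LASCO C3 Combo",
--     }
--
--     # EIT
--     products_eit = ["171", "195", "284", "304"]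
--     root = "https://soho.nascom.nasa.gov/data/LATEST/current_eit_"
--     suffix = ".mp4"
--     info = {}
--     for p in products:
--         if p not in products_eit:
--             continue
--         image = root + p + suffix
--         info[p] = image
--
--     # LASCO
--     products_lasco = ["c2", "c3", "c2_combo", "c3_combo"]
--     root = "https://soho.nascom.nasa.gov/data/LATEST/current_"
--     suffix = ".mp4"
--     for p in products:
--         if p not in products_lasco:
--             continue
--         image = root + p + suffix
--         info[p] = image
--
--     return info, product_information
-- ===== SOURCE B (Python) =====
-- _EIT_ROOT = "https://soho.nascom.nasa.gov/data/LATEST/current_eit_"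
-- _LASCO_ROOT = "https://soho.nascom.nasa.gov/data/LATEST/current_"
--
-- _URLS = {
--     "171": _EIT_ROOT + "171.mp4",
--     "195": _EIT_ROOT + "195.mp4",
--     "284": _EIT_ROOT + "284.mp4",
--     "304": _EIT_ROOT + "304.mp4",
--     "c2": _LASCO_ROOT + "c2.mp4",
--     "c3": _LASCO_ROOT + "c3.mp4",
--     "c2_combo": _LASCO_ROOT + "c2_combo.mp4",
--     "c3_combo": _LASCO_ROOT + "c3_combo.mp4",
-- }
--
-- _EIT_KEYS = {"171", "195", "284", "304"}
--
--
-- def soho_video(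
--     products=[],
-- ):
--     product_information = {
--         "171": r"EIT 171 Å",
--         "195": r"EIT 195 Å",
--         "284": r"EIT 284 Å",
--         "304": r"EIT 304 Å",
--         "c2": r"LASCO C2",
--         "c3": r"LASCO C3",
--         "c2_combo": r"LASCO C2 Combo",
--         "c3_combo": r"LASCO C3 Combo",
--     }
--
--     eit = {}
--     lasco = {}
--     for p in products:
--         if p in _URLS:
--             u = _URLS[p]
--             if p in _EIT_KEYS:
--                 eit[p] = u
--             else:
--                 lasco[p] = u
--
--     info = dict(eit)
--     info.update(lasco)
--     return info, product_information
-- ===== Notes on version B (the rewrite author's own statement) =====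
-- stated objective: alternative
-- what changed: Replaces A's two separate filtered passes over products (EIT pass then LASCO pass, each rebuilding the URL from a root) by one precomputed constant URL table and a single pass that routes each known product into an EIT or a LASCO bucket dict, merging the buckets (EIT first) afterwards.
import Mathlib
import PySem

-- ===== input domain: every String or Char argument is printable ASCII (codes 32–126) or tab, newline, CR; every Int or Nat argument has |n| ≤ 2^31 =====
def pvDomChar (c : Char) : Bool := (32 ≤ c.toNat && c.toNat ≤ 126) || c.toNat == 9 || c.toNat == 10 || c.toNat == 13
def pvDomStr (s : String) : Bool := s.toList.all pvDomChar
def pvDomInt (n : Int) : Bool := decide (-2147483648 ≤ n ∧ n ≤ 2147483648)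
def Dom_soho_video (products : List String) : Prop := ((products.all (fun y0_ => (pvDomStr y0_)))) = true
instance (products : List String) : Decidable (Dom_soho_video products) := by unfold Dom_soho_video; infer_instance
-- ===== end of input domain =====

-- B replaces A's two filtered passes over `products` by one constant URL table and a single
-- pass routing each known product into an EIT or LASCO bucket, merged afterwards (objective: alternative).

-- ===== PORT A =====
def soho_video (products : List String) : (List (String × String)) × (List (String × String)) :=
  let product_information : PySem.Dict String String := PySem.Dict.mk
    [("171", "EIT 171 Å"), ("195", "EIT 195 Å"), ("284", "EIT 284 Å"), ("304", "EIT 304 Å"),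
     ("c2", "LASCO C2"), ("c3", "LASCO C3"), ("c2_combo", "LASCO C2 Combo"), ("c3_combo", "LASCO C3 Combo")]
  -- EIT
  let products_eit : List String := ["171", "195", "284", "304"]
  let root := "https://soho.nascom.nasa.gov/data/LATEST/current_eit_"
  let suffix := ".mp4"
  let info : PySem.Dict String String :=
    products.foldl (fun info p =>
      if p ∉ products_eit then info
      else info.insert p (root ++ p ++ suffix)) PySem.Dict.empty
  -- LASCO
  let products_lasco : List String := ["c2", "c3", "c2_combo", "c3_combo"]
  let root2 := "https://soho.nascom.nasa.gov/data/LATEST/current_"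
  let info2 : PySem.Dict String String :=
    products.foldl (fun info p =>
      if p ∉ products_lasco then info
      else info.insert p (root2 ++ p ++ suffix)) info
  (info2.items, product_information.items)

-- ===== PORT B =====
def sohoUrls : PySem.Dict String String := PySem.Dict.mk
  [("171", "https://soho.nascom.nasa.gov/data/LATEST/current_eit_171.mp4"),
   ("195", "https://soho.nascom.nasa.gov/data/LATEST/current_eit_195.mp4"),
   ("284", "https://soho.nascom.nasa.gov/data/LATEST/current_eit_284.mp4"),
   ("304", "https://soho.nascom.nasa.gov/data/LATEST/current_eit_304.mp4"),
   ("c2", "https://soho.nascom.nasa.gov/data/LATEST/current_c2.mp4"),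
   ("c3", "https://soho.nascom.nasa.gov/data/LATEST/current_c3.mp4"),
   ("c2_combo", "https://soho.nascom.nasa.gov/data/LATEST/current_c2_combo.mp4"),
   ("c3_combo", "https://soho.nascom.nasa.gov/data/LATEST/current_c3_combo.mp4")]

def sohoEitKeys : PySem.Set String := PySem.Set.ofList ["171", "195", "284", "304"]

def soho_video_alt (products : List String) : (List (String × String)) × (List (String × String)) :=
  let product_information : PySem.Dict String String := PySem.Dict.mk
    [("171", "EIT 171 Å"), ("195", "EIT 195 Å"), ("284", "EIT 284 Å"), ("304", "EIT 304 Å"),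
     ("c2", "LASCO C2"), ("c3", "LASCO C3"), ("c2_combo", "LASCO C2 Combo"), ("c3_combo", "LASCO C3 Combo")]
  -- single pass: route each known product into its family's bucket
  let el : PySem.Dict String String × PySem.Dict String String :=
    products.foldl (fun el p =>
      if sohoUrls.contains p then        -- `if p in _URLS:`
        let u := sohoUrls.getD p ""      -- `_URLS[p]`: key present (contains), so the default is never used
        if PySem.Set.contains sohoEitKeys p then (el.1.insert p u, el.2)
        else (el.1, el.2.insert p u)
      else el) (PySem.Dict.empty, PySem.Dict.empty)
  let info := el.1.update el.2.items      -- info = dict(eit); info.update(lasco)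
  (info.items, product_information.items)

-- ===== PRECONDITION & SPEC =====
def Spec_soho_video (products : List String) (out : (List (String × String)) × (List (String × String))) : Prop := out = soho_video_alt products
instance (products : List String) (out : (List (String × String)) × (List (String × String))) : Decidable (Spec_soho_video products out) := by unfold Spec_soho_video; infer_instance

-- ===== CLAIM (what is proved, stated in full; the proofs are below) =====
def Claim_equal_soho_video : Prop := ∀ (products : List String), Dom_soho_video products → Spec_soho_video products (soho_video products)

-- ===== LEMMAS AND PROOFS =====

def sohoEitL : List String := ["171", "195", "284", "304"]
def sohoLascoL : List String := ["c2", "c3", "c2_combo", "c3_combo"]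

def sohoG (p : String) : String :=
  if p ∈ sohoEitL then "https://soho.nascom.nasa.gov/data/LATEST/current_eit_" ++ p ++ ".mp4"
  else "https://soho.nascom.nasa.gov/data/LATEST/current_" ++ p ++ ".mp4"

def sohoCanon (S : List String) : PySem.Dict String String :=
  PySem.Dict.mk (S.map (fun k => (k, sohoG k)))

def sohoStepE (e : PySem.Dict String String) (p : String) : PySem.Dict String String :=
  if p ∈ sohoEitL then e.insert p (sohoG p) else e

def sohoStepL (d : PySem.Dict String String) (p : String) : PySem.Dict String String :=
  if p ∈ sohoLascoL then d.insert p (sohoG p) else d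

lemma sohoDisj (x : String) (hx : x ∈ sohoLascoL) : x ∉ sohoEitL := by
  simp only [sohoLascoL, List.mem_cons, List.not_mem_nil, or_false] at hx
  rcases hx with rfl | rfl | rfl | rfl <;> decide

lemma sohoCanon_items (S : List String) :
    (sohoCanon S).items = S.map (fun k => (k, sohoG k)) := rfl

lemma sohoCanon_contains (S : List String) (p : String) :
    (sohoCanon S).contains p = decide (p ∈ S) := by
  rw [PySem.Dict.contains_eq_decide_mem_keys]
  simp [sohoCanon, PySem.Dict.keys, Function.comp]

lemma sohoCanon_insert (S : List String) (p : String) :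
    (sohoCanon S).insert p (sohoG p) = sohoCanon (PySem.Set.add S p) := by
  by_cases hmem : p ∈ S
  · have hc : (sohoCanon S).contains p = true := by simp [sohoCanon_contains, hmem]
    have hadd : PySem.Set.add S p = S := by
      simp [PySem.Set.add, PySem.Set.contains, hmem]
    apply PySem.Dict.ext
    rw [PySem.Dict.items_insert_of_contains _ _ hc, hadd]
    show (S.map (fun k => (k, sohoG k))).map _ = S.map (fun k => (k, sohoG k))
    rw [List.map_map]
    apply List.map_congr_left
    intro k _
    simp only [Function.comp_apply]
    by_cases hkp : k = p
    · subst hkp; simp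
    · simp [hkp]
  · have hc : (sohoCanon S).contains p = false := by simp [sohoCanon_contains, hmem]
    have hadd : PySem.Set.add S p = S ++ [p] := by
      simp [PySem.Set.add, PySem.Set.contains, hmem]
    apply PySem.Dict.ext
    rw [PySem.Dict.items_insert_of_not_contains _ _ hc, hadd]
    show S.map (fun k => (k, sohoG k)) ++ _ = (S ++ [p]).map (fun k => (k, sohoG k))
    simp

lemma sohoCanon_foldl (l S : List String) :
    l.foldl (fun d p => d.insert p (sohoG p)) (sohoCanon S) = sohoCanon (PySem.Set.update S l) := by
  induction l generalizing S with
  | nil => rfl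
  | cons p t ih =>
    rw [List.foldl_cons, PySem.Set.update_cons, sohoCanon_insert]
    exact ih _

lemma sohoStepE_fold (l S : List String) :
    l.foldl sohoStepE (sohoCanon S)
      = sohoCanon (PySem.Set.update S (l.filter (fun p => decide (p ∈ sohoEitL)))) := by
  show l.foldl (fun d p => if p ∈ sohoEitL then d.insert p (sohoG p) else d) (sohoCanon S) = _
  rw [PySem.List.foldl_ite_eq_foldl_filter, sohoCanon_foldl]

lemma sohoStepL_fold (l S : List String) :
    l.foldl sohoStepL (sohoCanon S)
      = sohoCanon (PySem.Set.update S (l.filter (fun p => decide (p ∈ sohoLascoL)))) := by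
  show l.foldl (fun d p => if p ∈ sohoLascoL then d.insert p (sohoG p) else d) (sohoCanon S) = _
  rw [PySem.List.foldl_ite_eq_foldl_filter, sohoCanon_foldl]

lemma sohoMerge (E L : List String)
    (hE : ∀ x ∈ E, x ∈ sohoEitL) (hL : ∀ x ∈ L, x ∈ sohoLascoL) (hnd : L.Nodup) :
    (sohoCanon E).update (sohoCanon L).items = sohoCanon (E ++ L) := by
  have hfresh : ∀ a ∈ (sohoCanon L).items, (sohoCanon E).contains a.1 = false := by
    intro a ha
    rw [sohoCanon_items] at ha
    obtain ⟨k, hk, rfl⟩ := List.mem_map.mp ha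
    rw [sohoCanon_contains]
    simp only [decide_eq_false_iff_not]
    intro hmem
    exact sohoDisj k (hL _ hk) (hE _ hmem)
  have hndk : ((sohoCanon L).items.map Prod.fst).Nodup := by
    rw [sohoCanon_items, List.map_map]
    have hcomp : (Prod.fst ∘ fun k : String => (k, sohoG k)) = id := rfl
    rw [hcomp, List.map_id]
    exact hnd
  apply PySem.Dict.ext
  show ((sohoCanon L).items.foldl (fun d p => d.insert p.1 p.2) (sohoCanon E)).items = _
  rw [PySem.Dict.items_foldl_insert_fresh _ _ _ _ hfresh hndk, sohoCanon_items, sohoCanon_items,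
    sohoCanon_items]
  simp

lemma sohoSetUpdate_append (E LF : List String)
    (hE : ∀ x ∈ E, x ∈ sohoEitL) (hLF : ∀ x ∈ LF, x ∈ sohoLascoL) :
    PySem.Set.update E LF = E ++ PySem.Set.ofList LF := by
  rw [PySem.Set.update_eq_append_filter]
  congr 1
  rw [List.filter_eq_self]
  intro y hy
  have hyL : y ∈ LF := (PySem.Set.mem_ofList _ _).mp hy
  simp only [Bool.not_eq_eq_eq_not]
  have hyE : y ∉ E := fun hmem => sohoDisj y (hLF _ hyL) (hE _ hmem)
  simp [PySem.Set.contains, hyE]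

-- ===== VERDICT (by name: the statement is the Claim_ definition above) =====
theorem soho_video_spec : Claim_equal_soho_video := by
  intro products _
  unfold Spec_soho_video
  simp only [soho_video, soho_video_alt]
  have hA1 : (fun (info : PySem.Dict String String) (p : String) =>
      if p ∉ (["171", "195", "284", "304"] : List String) then info
      else info.insert p ("https://soho.nascom.nasa.gov/data/LATEST/current_eit_" ++ p ++ ".mp4"))
      = sohoStepE := by
    funext d p
    by_cases hp : p ∈ (["171", "195", "284", "304"] : List String) <;>
      simp [sohoStepE, sohoG, sohoEitL, hp]
  have hA2 : (fun (info : PySem.Dict String String) (p : String) =>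
      if p ∉ (["c2", "c3", "c2_combo", "c3_combo"] : List String) then info
      else info.insert p ("https://soho.nascom.nasa.gov/data/LATEST/current_" ++ p ++ ".mp4"))
      = sohoStepL := by
    funext d p
    by_cases hp : p ∈ (["c2", "c3", "c2_combo", "c3_combo"] : List String)
    · have hne : p ∉ (["171", "195", "284", "304"] : List String) := sohoDisj p hp
      simp [sohoStepL, sohoG, sohoEitL, sohoLascoL, hp, hne]
    · simp [sohoStepL, sohoLascoL, hp]
  have hB : (fun (el : PySem.Dict String String × PySem.Dict String String) (p : String) =>
      if sohoUrls.contains p then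
        if PySem.Set.contains sohoEitKeys p then (el.1.insert p (sohoUrls.getD p ""), el.2)
        else (el.1, el.2.insert p (sohoUrls.getD p ""))
      else el)
      = fun s e => (sohoStepE s.1 e, sohoStepL s.2 e) := by
    funext el p
    by_cases he : p ∈ sohoEitL
    · have hl : p ∉ sohoLascoL := fun h => sohoDisj p h he
      simp only [sohoEitL, List.mem_cons, List.not_mem_nil, or_false] at he
      rcases he with rfl | rfl | rfl | rfl <;> rfl
    · by_cases hl : p ∈ sohoLascoL
      · simp only [sohoLascoL, List.mem_cons, List.not_mem_nil, or_false] at hl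
        rcases hl with rfl | rfl | rfl | rfl <;> rfl
      · have h8 : sohoUrls.contains p = false := by
          rw [PySem.Dict.contains_eq_decide_mem_keys]
          simp only [decide_eq_false_iff_not, sohoUrls, PySem.Dict.keys_mk, List.map_cons,
            List.map_nil, List.mem_cons, List.not_mem_nil, or_false]
          simp only [sohoEitL, List.mem_cons, List.not_mem_nil, or_false] at he
          simp only [sohoLascoL, List.mem_cons, List.not_mem_nil, or_false] at hl
          tauto
        simp [h8, sohoStepE, sohoStepL, he, hl]
  rw [hA1, hA2, hB, PySem.List.foldl_prod_mk]
  dsimp only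
  have hempty : (PySem.Dict.empty : PySem.Dict String String) = sohoCanon [] := rfl
  rw [hempty]
  simp only [sohoStepE_fold, sohoStepL_fold]
  have hofl : ∀ l : List String,
      PySem.Set.update ([] : PySem.Set String) l = PySem.Set.ofList l := fun l => rfl
  simp only [hofl]
  set eitF := products.filter (fun p => decide (p ∈ sohoEitL)) with heitF
  set lascoF := products.filter (fun p => decide (p ∈ sohoLascoL)) with hlascoF
  have hEsub : ∀ x ∈ PySem.Set.ofList eitF, x ∈ sohoEitL := by
    intro x hx
    have hmem := (PySem.Set.mem_ofList _ _).mp hx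
    rw [heitF] at hmem
    simpa using (List.mem_filter.mp hmem).2
  have hLsub : ∀ x ∈ PySem.Set.ofList lascoF, x ∈ sohoLascoL := by
    intro x hx
    have hmem := (PySem.Set.mem_ofList _ _).mp hx
    rw [hlascoF] at hmem
    simpa using (List.mem_filter.mp hmem).2
  have hLFsub : ∀ x ∈ lascoF, x ∈ sohoLascoL := by
    intro x hx
    rw [hlascoF] at hx
    simpa using (List.mem_filter.mp hx).2
  rw [sohoMerge _ _ hEsub hLsub (PySem.Set.nodup_ofList _),
    sohoSetUpdate_append _ _ hEsub hLFsub]
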